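-- pv_equiv track=rewrite | github.com/KKKKSHI30/Leetcode | _OA/Goldman Sachs/Chair Requirements.py | min_chairs
-- ===== SOURCE A (Python) =====
-- def min_chairs(simulations):
--     min_chairs = []
--
--     for simulation in simulations:
--         occupied_chairs = 0
--         total_chairs = 0
--
--         for action in simulation:
--             if action == 'C' or action == 'U':
--                 if total_chairs == occupied_chairs:
--                     total_chairs += 1
--                 occupied_chairs += 1
--             elif action == 'R' or action == 'L':
--                 occupied_chairs -= 1
--         min_chairs.append(total_chairs)
--
--     return min_chairs
-- ===== SOURCE B (Python) =====
-- def min_chairs(simulations):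
--     # Divide-and-conquer: each simulation's answer is the peak occupancy, computed
--     # by recursively combining (net change, peak) summaries of the two halves.
--     return [_net_peak(s)[1] for s in simulations]
--
-- def _net_peak(s):
--     # returns (net occupancy change over s, max occupancy reached, floored at 0)
--     if len(s) <= 1:
--         d = 1 if s in ('C', 'U') else -1 if s in ('R', 'L') else 0
--         return (d, max(0, d))
--     m = len(s) // 2
--     ln, lp = _net_peak(s[:m])
--     rn, rp = _net_peak(s[m:])
--     return (ln + rn, max(lp, ln + rp))
-- ===== Notes on version B (the rewrite author's own statement) =====
-- stated objective: alternative
-- what changed: Replaces A's left-to-right fused occupied/total counter loop with a divide-and-conquer recursion that summarizes each half of a simulation as (net change, peak occupancy) and combines the summaries, using that the peak of a concatenation is max(left peak, left net + right peak).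
import Mathlib
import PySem

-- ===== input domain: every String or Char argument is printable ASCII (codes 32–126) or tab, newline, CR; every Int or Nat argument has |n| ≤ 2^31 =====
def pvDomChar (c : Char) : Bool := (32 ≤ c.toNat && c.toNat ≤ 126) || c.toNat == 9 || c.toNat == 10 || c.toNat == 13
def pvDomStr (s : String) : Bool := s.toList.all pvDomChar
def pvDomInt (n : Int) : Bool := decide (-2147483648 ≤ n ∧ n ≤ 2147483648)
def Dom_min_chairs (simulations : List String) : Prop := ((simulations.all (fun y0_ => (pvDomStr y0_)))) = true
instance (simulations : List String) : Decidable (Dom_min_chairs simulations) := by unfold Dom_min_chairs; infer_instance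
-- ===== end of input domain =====

-- B computes each simulation's answer by a divide-and-conquer recursion combining (net change, peak occupancy) summaries of halves, instead of A's left-to-right occupied/total counter loop; equivalence on all inputs.


-- ===== PORT A =====
-- one step of A's inner loop; state = (occupied_chairs, total_chairs)
def minChairsStepA (st : Int × Int) (c : Char) : Int × Int :=
  if c = 'C' ∨ c = 'U' then
    (st.1 + 1, if st.2 = st.1 then st.2 + 1 else st.2)
  else if c = 'R' ∨ c = 'L' then
    (st.1 - 1, st.2)
  else st

def min_chairs (simulations : List String) : List Int :=
  simulations.foldl (fun acc s => acc ++ [(s.toList.foldl minChairsStepA (0, 0)).2]) []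

-- ===== PORT B =====
-- d = 1 if s in ('C','U') else -1 if s in ('R','L') else 0
def minChairsDelta (c : Char) : Int :=
  if c = 'C' ∨ c = 'U' then 1 else if c = 'R' ∨ c = 'L' then -1 else 0

-- _net_peak: (net occupancy change, peak occupancy floored at 0) by halving recursion
def minChairsNetPeak : List Char → Int × Int
  | [] => (0, 0)
  | [c] => (minChairsDelta c, max 0 (minChairsDelta c))
  | a :: b :: t =>
    let m := (a :: b :: t).length / 2
    let lres := minChairsNetPeak ((a :: b :: t).take m)
    let rres := minChairsNetPeak ((a :: b :: t).drop m)
    (lres.1 + rres.1, max lres.2 (lres.1 + rres.2))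
termination_by l => l.length
decreasing_by
  · simp [List.length_take]; omega
  · simp [List.length_drop]; omega

def min_chairs_alt (simulations : List String) : List Int :=
  simulations.map (fun s => (minChairsNetPeak s.toList).2)

-- ===== PRECONDITION & SPEC =====
def Spec_min_chairs (simulations : List String) (out : List Int) : Prop := out = min_chairs_alt simulations
instance (simulations : List String) (out : List Int) : Decidable (Spec_min_chairs simulations out) := by unfold Spec_min_chairs; infer_instance

-- ===== CLAIM (what is proved, stated in full; the proofs are below) =====
def Claim_equal_min_chairs : Prop := ∀ (simulations : List String), Dom_min_chairs simulations → Spec_min_chairs simulations (min_chairs simulations)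

-- ===== LEMMAS AND PROOFS =====

-- reference semantics: net delta sum and running max of prefix sums (0 included)
def minChairsSum (l : List Char) : Int := (l.map minChairsDelta).sum

def minChairsPmax : List Char → Int
  | [] => 0
  | c :: l => max 0 (minChairsDelta c + minChairsPmax l)

theorem minChairsPmax_nonneg (l : List Char) : 0 ≤ minChairsPmax l := by
  cases l <;> simp [minChairsPmax]

theorem minChairsPmax_append (l r : List Char) :
    minChairsPmax (l ++ r) = max (minChairsPmax l) (minChairsSum l + minChairsPmax r) := by
  induction l with
  | nil =>
    have := minChairsPmax_nonneg r
    simp [minChairsPmax, minChairsSum]; omega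
  | cons c l ih =>
    simp only [List.cons_append, minChairsPmax, ih, minChairsSum, List.map_cons, List.sum_cons]
    omega

theorem minChairsNetPeak_eq (l : List Char) :
    minChairsNetPeak l = (minChairsSum l, minChairsPmax l) := by
  induction l using minChairsNetPeak.induct with
  | case1 => simp [minChairsNetPeak, minChairsSum, minChairsPmax]
  | case2 c => simp [minChairsNetPeak, minChairsSum, minChairsPmax]
  | case3 a b t m ihl ihr =>
    rw [minChairsNetPeak]
    have h := minChairsPmax_append ((a :: b :: t).take ((a :: b :: t).length / 2))
        ((a :: b :: t).drop ((a :: b :: t).length / 2))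
    rw [List.take_append_drop] at h
    have hs : minChairsSum (a :: b :: t)
        = minChairsSum ((a :: b :: t).take ((a :: b :: t).length / 2))
          + minChairsSum ((a :: b :: t).drop ((a :: b :: t).length / 2)) := by
      unfold minChairsSum
      rw [← List.sum_append, ← List.map_append, List.take_append_drop]
    simp only [show m = (a :: b :: t).length / 2 from rfl] at ihl ihr
    simp only [ihl, ihr, h, hs]

-- A's inner loop tracks (occupied, total): total = max tot (occ + pmax rest)
theorem minChairsA_char (l : List Char) (occ tot : Int) (h : occ ≤ tot) :
    (l.foldl minChairsStepA (occ, tot)).2 = max tot (occ + minChairsPmax l) := by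
  induction l generalizing occ tot with
  | nil => simp [minChairsPmax]; omega
  | cons c l ih =>
    simp only [List.foldl_cons, minChairsPmax]
    by_cases hcu : c = 'C' ∨ c = 'U'
    · have hd : minChairsDelta c = 1 := by rcases hcu with rfl | rfl <;> decide
      simp only [minChairsStepA, hcu, if_true, hd]
      by_cases he : tot = occ
      · rw [if_pos he, ih (occ + 1) (tot + 1) (by omega)]
        have := minChairsPmax_nonneg l
        omega
      · rw [if_neg he, ih (occ + 1) tot (by omega)]
        have := minChairsPmax_nonneg l
        omega
    · by_cases hrl : c = 'R' ∨ c = 'L'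
      · have hd : minChairsDelta c = -1 := by rcases hrl with rfl | rfl <;> decide
        simp only [minChairsStepA, hcu, hrl, if_true, if_false, hd]
        rw [ih (occ - 1) tot (by omega)]
        have := minChairsPmax_nonneg l
        omega
      · have hd : minChairsDelta c = 0 := by simp [minChairsDelta, hcu, hrl]
        simp only [minChairsStepA, hcu, hrl, if_false, hd]
        rw [ih occ tot h]
        omega

theorem minChairs_per_string (s : String) :
    (s.toList.foldl minChairsStepA (0, 0)).2 = (minChairsNetPeak s.toList).2 := by
  rw [minChairsA_char s.toList 0 0 le_rfl, minChairsNetPeak_eq]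
  have := minChairsPmax_nonneg s.toList
  simp; omega

theorem minChairs_foldl_append (sims : List String) (acc : List Int) :
    sims.foldl (fun a s => a ++ [(s.toList.foldl minChairsStepA (0, 0)).2]) acc
      = acc ++ sims.map (fun s => (s.toList.foldl minChairsStepA (0, 0)).2) := by
  induction sims generalizing acc with
  | nil => simp
  | cons s sims ih => simp [ih]

-- ===== VERDICT (by name: the statement is the Claim_ definition above) =====
theorem min_chairs_spec : Claim_equal_min_chairs := by
  intro sims _
  unfold Spec_min_chairs min_chairs min_chairs_alt
  rw [minChairs_foldl_append]
  simp only [List.nil_append]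
  exact List.map_congr_left fun s _ => minChairs_per_string s
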